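-- pv_equiv track=rewrite | github.com/Aasthaengg/IBMdataset | Python_codes/p03018/s612951599.py | get_invnum
-- ===== SOURCE A (Python) =====
-- class FenwickTree:
--     def __init__(self, n):
--         self.n = n
--         self.data = [0] * (n + 1)
--         self.k_init = 2 ** (self.n - 1).bit_length()
--
--     def sum(self, i):
--         s = 0
--         while i > 0:
--             s += self.data[i]
--             i -= i & -i
--         return s
--
--     def add(self, i, x):
--         while i <= self.n:
--             self.data[i] += x
--             i += i & -i
--
-- def get_invnum(li):
--     n = len(li)
--     t = FenwickTree(2)
--     res = 0
--     for i in range(n):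
--         if li[i] == "A":
--             t.add(2, 1)
--         else:
--             res += t.sum(2)
--     return res
-- ===== SOURCE B (Python) =====
-- def get_invnum(li):
--     # Closed form: the A at position p with rank k (0-based among the A's) is followed
--     # by (n-1-p) - (m-1-k) non-A elements; summing over k gives the formula below.
--     n = len(li)
--     pos = [i for i, s in enumerate(li) if s == "A"]
--     m = len(pos)
--     return m * (n - 1) - m * (m - 1) // 2 - sum(pos)
-- ===== Notes on version B (the rewrite author's own statement) =====
-- stated objective: alternative
-- what changed: Replaces the FenwickTree-based running-count loop by a closed-form formula: collect the positions of the 'A's, then return m*(n-1) - m*(m-1)//2 - sum(pos), since the A of rank k at position p is followed by (n-1-p)-(m-1-k) non-A elements.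
import Mathlib
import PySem

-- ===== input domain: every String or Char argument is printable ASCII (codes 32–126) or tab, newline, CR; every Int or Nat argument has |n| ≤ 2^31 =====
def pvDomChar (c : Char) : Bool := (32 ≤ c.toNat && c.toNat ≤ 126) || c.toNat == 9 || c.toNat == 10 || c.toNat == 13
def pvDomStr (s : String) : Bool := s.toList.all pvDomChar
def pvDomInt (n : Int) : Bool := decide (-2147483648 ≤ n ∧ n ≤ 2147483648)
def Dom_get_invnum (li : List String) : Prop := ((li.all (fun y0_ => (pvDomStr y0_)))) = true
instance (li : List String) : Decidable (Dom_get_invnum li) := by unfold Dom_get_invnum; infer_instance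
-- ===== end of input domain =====

-- B replaces A's FenwickTree loop by a closed-form formula over the positions of the "A"s (objective: alternative).

-- ===== PORT A =====
-- FenwickTree.sum: 's = 0; while i > 0: s += self.data[i]; i -= i & -i'.
-- The while loop is ported with a fuel parameter (64 strictly exceeds the number of set bits
-- of any index used; in get_invnum the loop body runs exactly once, from i = 2 to i = 0).
-- self.data[i] is ported as (pyGet? data i).getD 0: in every call made by get_invnum the
-- index is in range (data has length 3, i = 2), so the default is never taken.
def ftSumLoop : Nat → List Int → Int → Int → Int
  | 0, _, _, s => s
  | fuel + 1, data, i, s =>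
    if i > 0 then
      ftSumLoop fuel data (i - (Int.land i (-i))) (s + (PySem.List.pyGet? data i).getD 0)
    else s

-- FenwickTree.add: 'while i <= self.n: self.data[i] += x; i += i & -i' (n = 2 here).
-- 'self.data[i] += x' is ported as List.set at i.toNat; every call uses i = 2 ≥ 0 in range.
def ftAddLoop : Nat → Int → List Int → Int → Int → List Int
  | 0, _, data, _, _ => data
  | fuel + 1, n, data, i, x =>
    if i ≤ n then
      ftAddLoop fuel n
        (data.set i.toNat ((PySem.List.pyGet? data i).getD 0 + x)) (i + (Int.land i (-i))) x
    else data

-- get_invnum: FenwickTree(2) has data = [0]*(2+1); k_init is never used and is not carried.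
def get_invnum (li : List String) : Int :=
  (PySem.List.pyRange 0 (li.length : Int) 1).foldl
    (fun (st : List Int × Int) i =>
      if PySem.List.pyGetD li i "" == "A" then (ftAddLoop 64 2 st.1 2 1, st.2)
      else (st.1, st.2 + ftSumLoop 64 st.1 2 0))
    (List.replicate 3 0, 0) |>.2

-- ===== PORT B =====
-- pos = [i for i, s in enumerate(li) if s == "A"]; m = len(pos);
-- return m * (n - 1) - m * (m - 1) // 2 - sum(pos)
def get_invnum_alt (li : List String) : Int :=
  let n : Int := (li.length : Int)
  let pos : List Int :=
    ((PySem.List.enumerate li 0).filter (fun ip => ip.2 == "A")).map (fun ip => ip.1)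
  let m : Int := (pos.length : Int)
  m * (n - 1) - PySem.Int.floordiv (m * (m - 1)) 2 - pos.sum

-- ===== PRECONDITION & SPEC =====
def Spec_get_invnum (li : List String) (out : Int) : Prop := out = get_invnum_alt li
instance (li : List String) (out : Int) : Decidable (Spec_get_invnum li out) := by unfold Spec_get_invnum; infer_instance

-- ===== CLAIM (what is proved, stated in full; the proofs are below) =====
def Claim_equal_get_invnum : Prop := ∀ (li : List String), Dom_get_invnum li → Spec_get_invnum li (get_invnum li)

-- ===== LEMMAS AND PROOFS =====

-- A's loop body, abbreviated for the proofs.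
def pvStepA (st : List Int × Int) (s : String) : List Int × Int :=
  if s == "A" then (ftAddLoop 64 2 st.1 2 1, st.2) else (st.1, st.2 + ftSumLoop 64 st.1 2 0)

-- A's result as a plain list fold.
def pvG (li : List String) : Int := (li.foldl pvStepA ([0, 0, 0], 0)).2

-- Number of "A"s / of non-"A"s in li, as Ints.
def pvM (li : List String) : Int := (li.countP (fun s => s == "A") : Int)
def pvN (li : List String) : Int := (li.countP (fun s => !(s == "A")) : Int)

-- Sum of the positions of the "A"s when enumeration starts at s.
def pvS (s : Int) : List String → Int
  | [] => 0
  | x :: xs => (if x == "A" then s else 0) + pvS (s + 1) xs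

-- One Fenwick add on the size-2 tree state [0, 0, c] just bumps the counter cell.
lemma land_two : Int.land 2 (-2) = 2 := by
  rw [show (-2 : Int) = Int.negSucc 1 from rfl, show (2 : Int) = Int.ofNat 2 from rfl]
  show (↑(Nat.ldiff 2 1) : Int) = 2
  simp [Nat.ldiff, Nat.bitwise]

lemma ftAddLoop_eq (c : Int) : ftAddLoop 64 2 [0, 0, c] 2 1 = [0, 0, c + 1] := by
  show ftAddLoop (63 + 1) 2 [0, 0, c] 2 1 = [0, 0, c + 1]
  rw [ftAddLoop, if_pos (by norm_num), land_two]
  show ftAddLoop (62 + 1) 2 _ 4 1 = [0, 0, c + 1]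
  rw [ftAddLoop, if_neg (by norm_num)]
  norm_num [PySem.List.pyGet?, PySem.List.pyIdx?]
  rfl

-- One Fenwick prefix sum on the size-2 tree state [0, 0, c] returns the counter cell.
lemma ftSumLoop_eq (c s : Int) : ftSumLoop 64 [0, 0, c] 2 s = s + c := by
  show ftSumLoop (63 + 1) [0, 0, c] 2 s = s + c
  rw [ftSumLoop, if_pos (by norm_num), land_two]
  show ftSumLoop (62 + 1) [0, 0, c] (2 - 2) _ = s + c
  rw [ftSumLoop, if_neg (by norm_num)]
  norm_num [PySem.List.pyGet?, PySem.List.pyIdx?]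
  rfl

-- One step of A's loop on the counter-shaped state, by the value of x == "A".
lemma stepA_A (c r : Int) (x : String) (hx : (x == "A") = true) :
    pvStepA ([0, 0, c], r) x = ([0, 0, c + 1], r) := by
  simp [pvStepA, hx, ftAddLoop_eq]

lemma stepA_notA (c r : Int) (x : String) (hx : (x == "A") = false) :
    pvStepA ([0, 0, c], r) x = ([0, 0, c], r + c) := by
  simp [pvStepA, hx, ftSumLoop_eq]

-- The four cons equations for the counts.
lemma pvM_cons_A (x : String) (xs : List String) (hx : (x == "A") = true) :
    pvM (x :: xs) = pvM xs + 1 := by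
  simp only [pvM, List.countP_cons, hx]
  push_cast
  simp

lemma pvM_cons_notA (x : String) (xs : List String) (hx : (x == "A") = false) :
    pvM (x :: xs) = pvM xs := by
  simp [pvM, hx]

lemma pvN_cons_A (x : String) (xs : List String) (hx : (x == "A") = true) :
    pvN (x :: xs) = pvN xs := by
  simp [pvN, hx]

lemma pvN_cons_notA (x : String) (xs : List String) (hx : (x == "A") = false) :
    pvN (x :: xs) = pvN xs + 1 := by
  simp only [pvN, List.countP_cons, hx]
  push_cast
  simp

-- A's fold from the generalized state ([0,0,c], res).
lemma foldA_eq (li : List String) : ∀ c res : Int,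
    (li.foldl pvStepA ([0, 0, c], res)).2 = res + c * pvN li + pvG li := by
  induction li with
  | nil => intro c res; simp [pvG, pvN]
  | cons x xs ih =>
    intro c res
    have hG : pvG (x :: xs) = (xs.foldl pvStepA (pvStepA ([0, 0, 0], 0) x)).2 := rfl
    cases hx : (x == "A") with
    | false =>
      rw [List.foldl_cons, stepA_notA c res x hx, ih c (res + c),
        hG, stepA_notA 0 0 x hx, ih 0 (0 + 0), pvN_cons_notA x xs hx]
      ring
    | true =>
      rw [List.foldl_cons, stepA_A c res x hx, ih (c + 1) res,
        hG, stepA_A 0 0 x hx, ih (0 + 1) 0, pvN_cons_A x xs hx]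
      ring

lemma pvG_cons_A (x : String) (xs : List String) (hx : (x == "A") = true) :
    pvG (x :: xs) = pvN xs + pvG xs := by
  have hG : pvG (x :: xs) = (xs.foldl pvStepA (pvStepA ([0, 0, 0], 0) x)).2 := rfl
  rw [hG, stepA_A 0 0 x hx, foldA_eq xs (0 + 1) 0]
  ring

lemma pvG_cons_notA (x : String) (xs : List String) (hx : (x == "A") = false) :
    pvG (x :: xs) = pvG xs := by
  have hG : pvG (x :: xs) = (xs.foldl pvStepA (pvStepA ([0, 0, 0], 0) x)).2 := rfl
  rw [hG, stepA_notA 0 0 x hx, foldA_eq xs 0 (0 + 0)]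
  ring

-- Shifting the enumeration start adds the number of "A"s to the position sum.
lemma pvS_succ (xs : List String) : ∀ s : Int, pvS (s + 1) xs = pvS s xs + pvM xs := by
  induction xs with
  | nil => intro s; simp [pvS, pvM]
  | cons x xs ih =>
    intro s
    cases hx : (x == "A") with
    | false =>
      rw [show pvS (s + 1) (x :: xs) = (if x == "A" then s + 1 else 0) + pvS (s + 1 + 1) xs from rfl,
        show pvS s (x :: xs) = (if x == "A" then s else 0) + pvS (s + 1) xs from rfl,
        pvM_cons_notA x xs hx, ih (s + 1)]
      simp [hx]
    | true =>
      rw [show pvS (s + 1) (x :: xs) = (if x == "A" then s + 1 else 0) + pvS (s + 1 + 1) xs from rfl,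
        show pvS s (x :: xs) = (if x == "A" then s else 0) + pvS (s + 1) xs from rfl,
        pvM_cons_A x xs hx, ih (s + 1)]
      simp [hx]
      ring

lemma pvS_cons (x : String) (xs : List String) :
    pvS 0 (x :: xs) = pvS 0 xs + pvM xs := by
  show (if x == "A" then (0 : Int) else 0) + pvS (0 + 1) xs = _
  rw [pvS_succ xs 0]
  split_ifs <;> ring

-- #nonA = length - #A.
lemma pvN_eq (xs : List String) : pvN xs = (xs.length : Int) - pvM xs := by
  simp only [pvN, pvM]
  have h1 := xs.length_eq_countP_add_countP (fun s => s == "A")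
  have h2 : List.countP (fun s => !(s == "A")) xs
      = List.countP (fun a => decide ¬((a == "A") = true)) xs :=
    List.countP_congr (fun a _ => by cases (a == "A") <;> simp)
  omega

-- The doubled closed form for A's fold.
lemma pvG_closed (li : List String) :
    2 * pvG li = 2 * pvM li * ((li.length : Int) - 1) - pvM li * (pvM li - 1) - 2 * pvS 0 li := by
  induction li with
  | nil => simp [pvG, pvM, pvS]
  | cons x xs ih =>
    have hnm := pvN_eq xs
    cases hx : (x == "A") with
    | false =>
      rw [pvG_cons_notA x xs hx, pvS_cons x xs, pvM_cons_notA x xs hx, List.length_cons]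
      push_cast
      linear_combination ih
    | true =>
      rw [pvG_cons_A x xs hx, pvS_cons x xs, pvM_cons_A x xs hx, List.length_cons]
      push_cast
      linear_combination ih + 2 * hnm

-- B's pos list has length pvM …
lemma pos_len (li : List String) : ∀ s : Int,
    ((((PySem.List.enumerate li s).filter (fun ip => ip.2 == "A")).map
        (fun ip => ip.1)).length : Int) = pvM li := by
  induction li with
  | nil => intro s; simp [PySem.List.enumerate_nil, pvM]
  | cons x xs ih =>
    intro s
    cases hx : (x == "A") with
    | false =>
      rw [PySem.List.enumerate_cons, pvM_cons_notA x xs hx]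
      simp only [List.filter_cons, hx]
      exact ih (s + 1)
    | true =>
      rw [PySem.List.enumerate_cons, pvM_cons_A x xs hx]
      simp only [List.filter_cons, hx, if_true, List.map_cons, List.length_cons]
      have h := ih (s + 1)
      push_cast at h ⊢
      omega

-- … and sum pvS.
lemma pos_sum (li : List String) : ∀ s : Int,
    ((((PySem.List.enumerate li s).filter (fun ip => ip.2 == "A")).map
        (fun ip => ip.1)).sum) = pvS s li := by
  induction li with
  | nil => intro s; simp [PySem.List.enumerate_nil, pvS]
  | cons x xs ih =>
    intro s
    cases hx : (x == "A") with
    | false =>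
      rw [show pvS s (x :: xs) = (if x == "A" then s else 0) + pvS (s + 1) xs from rfl,
        PySem.List.enumerate_cons, List.filter_cons, if_neg (by simp [hx]),
        ih (s + 1), if_neg (by simp [hx])]
      ring
    | true =>
      rw [show pvS s (x :: xs) = (if x == "A" then s else 0) + pvS (s + 1) xs from rfl,
        PySem.List.enumerate_cons, List.filter_cons, if_pos (by simp [hx]),
        List.map_cons, List.sum_cons, ih (s + 1), if_pos hx]

-- m * (m - 1) is even, so the floor division by 2 is exact.
lemma floordiv_even (m : Int) : 2 * PySem.Int.floordiv (m * (m - 1)) 2 = m * (m - 1) := by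
  rw [PySem.Int.floordiv_eq_ediv_of_pos (by norm_num)]
  obtain ⟨k, hk⟩ : 2 ∣ m * (m - 1) := by
    rcases Int.even_or_odd m with ⟨k, hk⟩ | ⟨k, hk⟩
    · exact ⟨k * (m - 1), by rw [hk]; ring⟩
    · exact ⟨m * k, by rw [hk]; ring⟩
  rw [hk, Int.mul_ediv_cancel_left _ (by norm_num)]

-- ===== VERDICT (by name: the statement is the Claim_ definition above) =====
theorem get_invnum_spec : Claim_equal_get_invnum := by
  intro li _
  unfold Spec_get_invnum get_invnum get_invnum_alt
  rw [PySem.List.foldl_pyRange_zero_pyGetD' li ""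
      (fun (st : List Int × Int) s =>
        if s == "A" then (ftAddLoop 64 2 st.1 2 1, st.2)
        else (st.1, st.2 + ftSumLoop 64 st.1 2 0))
      (List.replicate 3 0, 0)]
  show (li.foldl pvStepA ([0, 0, 0], 0)).2 = _
  simp only [pos_len li 0, pos_sum li 0]
  have h1 := pvG_closed li
  have h2 := floordiv_even (pvM li)
  show pvG li = _
  linarith [h1, h2]
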